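-- pv_equiv track=rewrite | github.com/cltl/Profiling | data_extraction/Wikidata_experiments/prepare_crowd_data.py | generate_rows
-- ===== SOURCE A (Python) =====
-- def generate_rows(data, entropy_ordering, reverse=False):
--     rows=[]
--     if reverse: this_entropy_ordering=list(entropy_ordering[::-1])
--     else: this_entropy_ordering=list(entropy_ordering)
--     for entity_uri, prop_values in data.items():
--         the_row=[]
--         c=0
--         for proppy in this_entropy_ordering:
--             if proppy not in prop_values.keys():
--                 break
--             the_row.append(prop_values[proppy])
--             c+=1
--             if c>=3 and c<10:
--                 if reverse:
--                     rows.append([entity_uri] + ['']*(10-c) + the_row[::-1])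
--                 else:
--                     rows.append([entity_uri] + the_row + ['']*(10-c))
--                 the_row=list(the_row)
--     return rows
-- ===== SOURCE B (Python) =====
-- def generate_rows(data, entropy_ordering, reverse=False):
--     order = entropy_ordering[::-1] if reverse else list(entropy_ordering)
--     rows = []
--     for entity_uri, prop_values in data.items():
--         values = []
--         for p in order:
--             if p not in prop_values:
--                 break
--             values.append(prop_values[p])
--         for c in range(3, min(len(values), 9) + 1):
--             pad = [''] * (10 - c)
--             if reverse:
--                 rows.append([entity_uri] + pad + values[:c][::-1])
--             else:
--                 rows.append([entity_uri] + values[:c] + pad)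
--     return rows
-- ===== Notes on version B (the rewrite author's own statement) =====
-- stated objective: simpler
-- what changed: Splits A's single interleaved loop (which grows the row, counts, and emits padded rows in one pass while re-copying the row list) into two plain passes per entity: first collect the prefix of values up to the first missing property, then emit one padded row per length c in range(3, min(len(values), 9) + 1) by slicing.
import Mathlib
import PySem

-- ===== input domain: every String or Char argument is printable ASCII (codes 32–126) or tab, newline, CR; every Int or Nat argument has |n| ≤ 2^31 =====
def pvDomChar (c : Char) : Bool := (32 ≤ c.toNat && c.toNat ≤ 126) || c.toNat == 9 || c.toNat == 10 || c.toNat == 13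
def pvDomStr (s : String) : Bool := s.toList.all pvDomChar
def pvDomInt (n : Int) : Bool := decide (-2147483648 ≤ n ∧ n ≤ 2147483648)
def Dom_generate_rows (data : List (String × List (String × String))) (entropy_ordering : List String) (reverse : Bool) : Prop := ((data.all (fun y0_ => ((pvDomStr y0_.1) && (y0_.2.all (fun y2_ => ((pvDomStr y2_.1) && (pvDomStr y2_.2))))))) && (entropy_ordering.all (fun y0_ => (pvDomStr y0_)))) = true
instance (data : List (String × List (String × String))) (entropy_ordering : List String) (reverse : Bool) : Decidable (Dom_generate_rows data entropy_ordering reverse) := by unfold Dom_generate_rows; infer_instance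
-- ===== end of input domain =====

-- B splits A's single interleaved per-entity loop into a collect pass (prefix of values up to the
-- first missing property) and a separate emit pass over range(3, min(len,9)+1); return values equal.

-- ===== PORT A =====
-- inner 'for proppy in this_entropy_ordering' loop of A, with its break and mutable state
-- (the_row, c, rows); 'the_row = list(the_row)' is a copy and leaves the value unchanged.
def aInner (reverse : Bool) (entity : String) (pv : List (String × String)) :
    List String → List String → Nat → List (List String) → List (List String)
  | [], _, _, rows => rows
  | p :: ps, the_row, c, rows =>
    match (PySem.Dict.mk pv).get? p with
    | none => rows
    | some v =>
      let the_row := the_row ++ [v]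
      let c := c + 1
      let rows :=
        if 3 ≤ c ∧ c < 10 then
          rows ++ [if reverse then entity :: (List.replicate (10 - c) "" ++ the_row.reverse)
                   else entity :: (the_row ++ List.replicate (10 - c) "")]
        else rows
      aInner reverse entity pv ps the_row c rows

def generate_rows (data : List (String × List (String × String))) (entropy_ordering : List String) (reverse : Bool) : List (List String) :=
  let this_entropy_ordering := if reverse then entropy_ordering.reverse else entropy_ordering
  data.foldl (fun rows ep => aInner reverse ep.1 ep.2 this_entropy_ordering [] 0 rows) []

-- ===== PORT B =====
-- collect pass: values of the ordering's prefix up to the first property missing from pv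
def bCollect (pv : List (String × String)) : List String → List String
  | [] => []
  | p :: ps =>
    match (PySem.Dict.mk pv).get? p with
    | none => []
    | some v => v :: bCollect pv ps

-- emit pass: one padded row per c in range(3, min(len(values), 9) + 1)
def bEmit (reverse : Bool) (entity : String) (values : List String) : List (List String) :=
  (PySem.List.pyRange 3 (min (values.length : Int) 9 + 1) 1).map (fun c =>
    let pad := List.replicate (10 - c).toNat ""
    if reverse then entity :: (pad ++ (values.take c.toNat).reverse)
    else entity :: (values.take c.toNat ++ pad))

def generate_rows_alt (data : List (String × List (String × String))) (entropy_ordering : List String) (reverse : Bool) : List (List String) :=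
  let order := if reverse then entropy_ordering.reverse else entropy_ordering
  data.flatMap (fun ep => bEmit reverse ep.1 (bCollect ep.2 order))

-- ===== PRECONDITION & SPEC =====
def Spec_generate_rows (data : List (String × List (String × String))) (entropy_ordering : List String) (reverse : Bool) (out : List (List String)) : Prop := out = generate_rows_alt data entropy_ordering reverse
instance (data : List (String × List (String × String))) (entropy_ordering : List String) (reverse : Bool) (out : List (List String)) : Decidable (Spec_generate_rows data entropy_ordering reverse out) := by unfold Spec_generate_rows; infer_instance

-- ===== CLAIM (what is proved, stated in full; the proofs are below) =====
def Claim_equal_generate_rows : Prop := ∀ (data : List (String × List (String × String))) (entropy_ordering : List String) (reverse : Bool), Dom_generate_rows data entropy_ordering reverse → Spec_generate_rows data entropy_ordering reverse (generate_rows data entropy_ordering reverse)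

-- ===== LEMMAS AND PROOFS =====

-- the row A appends for a built prefix r
def mkRow (reverse : Bool) (entity : String) (r : List String) : List String :=
  if reverse then entity :: (List.replicate (10 - r.length) "" ++ r.reverse)
  else entity :: (r ++ List.replicate (10 - r.length) "")

-- rows emitted by the rest of A's inner loop after having already built row r
def eRows (reverse : Bool) (entity : String) (r : List String) : List String → List (List String)
  | [] => []
  | v :: vs =>
    (if 3 ≤ r.length + 1 ∧ r.length + 1 < 10 then [mkRow reverse entity (r ++ [v])] else []) ++
      eRows reverse entity (r ++ [v]) vs

theorem aInner_eq (reverse : Bool) (entity : String) (pv : List (String × String)) :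
    ∀ (ps : List String) (r : List String) (rows : List (List String)),
      aInner reverse entity pv ps r r.length rows =
        rows ++ eRows reverse entity r (bCollect pv ps) := by
  intro ps
  induction ps with
  | nil => intro r rows; simp [aInner, bCollect, eRows]
  | cons p ps ih =>
    intro r rows
    simp only [aInner, bCollect]
    cases h : (PySem.Dict.mk pv).get? p with
    | none => simp [eRows]
    | some v =>
      simp only [eRows]
      have hlen : r.length + 1 = (r ++ [v]).length := by simp
      have hx : (if 3 ≤ r.length + 1 ∧ r.length + 1 < 10 then
            rows ++ [if reverse = true then
                entity :: (List.replicate (10 - (r.length + 1)) "" ++ (r ++ [v]).reverse)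
              else entity :: (r ++ [v] ++ List.replicate (10 - (r.length + 1)) "")]
          else rows)
          = rows ++ (if 3 ≤ r.length + 1 ∧ r.length + 1 < 10
              then [mkRow reverse entity (r ++ [v])] else []) := by
        unfold mkRow; split <;> simp
      rw [hx, hlen, ih (r ++ [v]), List.append_assoc]

theorem eRows_eq_filter_map (reverse : Bool) (entity : String) :
    ∀ (vs r : List String),
      eRows reverse entity r vs =
        ((List.range' (r.length + 1) vs.length).filter (fun c => 3 ≤ c && c < 10)).map
          (fun c => mkRow reverse entity ((r ++ vs).take c)) := by
  intro vs
  induction vs with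
  | nil => intro r; simp [eRows]
  | cons v vs ih =>
    intro r
    have hlen : (r ++ [v]).length = r.length + 1 := by simp
    have happ : (r ++ [v]) ++ vs = r ++ v :: vs := by simp
    have htake : (r ++ v :: vs).take (r.length + 1) = r ++ [v] := by
      rw [← happ, ← hlen]; exact List.take_left ..
    simp only [eRows, List.length_cons, List.range'_succ, List.filter_cons]
    rw [ih (r ++ [v]), hlen, happ]
    by_cases h : 3 ≤ r.length + 1 ∧ r.length + 1 < 10
    · have hb : (decide (3 ≤ r.length + 1) && decide (r.length + 1 < 10)) = true := by
        simp [h.1, h.2]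
      rw [if_pos h, hb, if_pos rfl, List.map_cons, htake]
      rfl
    · have hb : (decide (3 ≤ r.length + 1) && decide (r.length + 1 < 10)) = false := by
        cases Decidable.not_and_iff_not_or_not.mp h with
        | inl h' => simp [h']
        | inr h' => simp [h']
      rw [if_neg h, hb]
      simp

theorem range'_filter_window (n : Nat) :
    (List.range' 1 n).filter (fun c => 3 ≤ c && c < 10) =
      List.range' 3 (min n 9 + 1 - 3) := by
  induction n with
  | zero => simp
  | succ n ih =>
    rw [List.range'_1_concat, List.filter_append, ih]
    by_cases h3 : 3 ≤ n + 1
    · by_cases h10 : n + 1 < 10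
      · rw [Nat.min_eq_left (by omega : n + 1 ≤ 9), Nat.min_eq_left (by omega : n ≤ 9)]
        have hf : List.filter (fun c => 3 ≤ c && c < 10) [1 + n] = [1 + n] := by
          have hd : (decide (3 ≤ 1 + n) && decide (1 + n < 10)) = true := by
            rw [decide_eq_true (by omega : 3 ≤ 1 + n), decide_eq_true (by omega : 1 + n < 10)]
            rfl
          simp [List.filter, hd]
        rw [hf, show n + 1 + 1 - 3 = (n + 1 - 3) + 1 by omega, List.range'_concat,
          show (3 : Nat) + 1 * (n + 1 - 3) = 1 + n by omega]
      · rw [Nat.min_eq_right (by omega : 9 ≤ n + 1), Nat.min_eq_right (by omega : 9 ≤ n)]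
        have hf : List.filter (fun c => 3 ≤ c && c < 10) [1 + n] = [] := by
          have hd : (decide (3 ≤ 1 + n) && decide (1 + n < 10)) = false := by
            rw [decide_eq_false (by omega : ¬ (1 + n < 10))]
            simp
          simp [List.filter, hd]
        rw [hf]
        simp
    · rw [Nat.min_eq_left (by omega : n + 1 ≤ 9), Nat.min_eq_left (by omega : n ≤ 9)]
      have hf : List.filter (fun c => 3 ≤ c && c < 10) [1 + n] = [] := by
        have hd : (decide (3 ≤ 1 + n) && decide (1 + n < 10)) = false := by
          rw [decide_eq_false (by omega : ¬ (3 ≤ 1 + n))]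
          rfl
        simp [List.filter, hd]
      rw [hf, show n + 1 + 1 - 3 = 0 by omega, show n + 1 - 3 = 0 by omega]
      simp

theorem bEmit_eq (reverse : Bool) (entity : String) (vs : List String) :
    bEmit reverse entity vs =
      (List.range' 3 (min vs.length 9 + 1 - 3)).map
        (fun c => mkRow reverse entity (vs.take c)) := by
  unfold bEmit
  rw [PySem.List.pyRange_one, List.range'_eq_map_range, List.map_map, List.map_map]
  have hcast : min ((vs.length : Nat) : Int) 9 = ((min vs.length 9 : Nat) : Int) := by
    rw [Nat.cast_min]; rfl
  have hm : (min ((vs.length : Nat) : Int) 9 + 1 - 3).toNat = min vs.length 9 + 1 - 3 := by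
    rw [hcast]; omega
  rw [hm]
  apply List.map_congr_left
  intro k hk
  have hk' : k < min vs.length 9 + 1 - 3 := List.mem_range.mp hk
  have h1 : ((10 : Int) - ((3 : Int) + (k : Int))).toNat = 10 - (3 + k) := by omega
  have h2 : ((3 : Int) + (k : Int)).toNat = 3 + k := by omega
  have h3 : (vs.take (3 + k)).length = 3 + k := by
    rw [List.length_take]; omega
  simp only [Function.comp, mkRow, h1, h2, h3]

theorem per_entity (reverse : Bool) (entity : String) (pv : List (String × String))
    (order : List String) (rows : List (List String)) :
    aInner reverse entity pv order [] 0 rows =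
      rows ++ bEmit reverse entity (bCollect pv order) := by
  have h := aInner_eq reverse entity pv order [] rows
  simp only [List.length_nil] at h
  rw [h, eRows_eq_filter_map, bEmit_eq]
  simp [range'_filter_window]

-- ===== VERDICT (by name: the statement is the Claim_ definition above) =====
theorem generate_rows_spec : Claim_equal_generate_rows := by
  intro data entropy_ordering reverse _
  unfold Spec_generate_rows generate_rows generate_rows_alt
  simp only [per_entity]
  exact (PySem.List.foldl_append_eq_flatMap _ _ _).trans (by simp)
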